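-- pv_equiv track=rewrite | github.com/andresmartinroyo/RepositorioAndresMartin | a1/Parciales1/Paciales1516/Parcial15162/Problema1.py | ambicioso
-- ===== SOURCE A (Python) =====
-- def ambicioso(num):
--     suma=1
--     for i in range(2,num):
--         if num % i == 0:
--             suma+=i
--
--     suma2=1
--     for i in range(2,suma):
--         if suma % i==0:
--             suma2+=i
--     if suma2==suma:
--         return True
--     else:
--         return False
-- ===== SOURCE B (Python) =====
-- def ambicioso(num):
--     # faster: divisor-sum via paired divisors up to sqrt(n), O(sqrt(n)) instead of O(n)
--     def propsum(n):
--         s = 1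
--         i = 2
--         while i * i <= n:
--             if n % i == 0:
--                 j = n // i
--                 s += i + j if j != i else i
--             i += 1
--         return s
--     s = propsum(num)
--     return propsum(s) == s
-- ===== Notes on version B (the rewrite author's own statement) =====
-- stated objective: faster
-- what changed: Replaces the two O(n) trial loops over range(2,n) with a shared helper that sums proper divisors in O(sqrt(n)) by adding each small divisor i together with its cofactor n//i.
import Mathlib
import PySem

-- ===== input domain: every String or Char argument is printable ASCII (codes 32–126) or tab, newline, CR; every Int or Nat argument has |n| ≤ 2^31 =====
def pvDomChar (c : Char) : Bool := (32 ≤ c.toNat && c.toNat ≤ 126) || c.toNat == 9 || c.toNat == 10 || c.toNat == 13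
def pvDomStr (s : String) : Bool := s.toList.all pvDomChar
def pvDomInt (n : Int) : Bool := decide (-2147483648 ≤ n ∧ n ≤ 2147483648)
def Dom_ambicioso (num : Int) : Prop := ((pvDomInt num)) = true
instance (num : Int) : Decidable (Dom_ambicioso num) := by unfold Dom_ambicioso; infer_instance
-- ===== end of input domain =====

-- Re-implementation: divisor-sum by paired divisors up to sqrt(n) (O(sqrt n) vs A's O(n)); same value on every int.


-- ===== PORT A =====
def ambicioso (num : Int) : Bool :=
  let suma := (PySem.List.pyRange 2 num 1).foldl
    (fun s i => if PySem.Int.mod num i == 0 then s + i else s) 1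
  let suma2 := (PySem.List.pyRange 2 suma 1).foldl
    (fun s i => if PySem.Int.mod suma i == 0 then s + i else s) 1
  if suma2 == suma then true else false

-- ===== PORT B =====
-- while i*i <= n loop of Source B's propsum (fuel is a totality guard only:
-- (n + 1 - i).toNat bounds the remaining iterations, so it never cuts the loop short)
def propsumLoop : Nat → Int → Int → Int → Int
  | 0, _, _, s => s
  | fuel + 1, n, i, s =>
    if i * i ≤ n then
      propsumLoop fuel n (i + 1)
        (if PySem.Int.mod n i == 0 then
          (let j := PySem.Int.floordiv n i
           if j != i then s + (i + j) else s + i)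
        else s)
    else s

def propsum (n : Int) : Int := propsumLoop (n + 1 - 2).toNat n 2 1

def ambicioso_alt (num : Int) : Bool :=
  let s := propsum num
  propsum s == s

-- ===== PRECONDITION & SPEC =====
def Spec_ambicioso (num : Int) (out : Bool) : Prop := out = ambicioso_alt num
instance (num : Int) (out : Bool) : Decidable (Spec_ambicioso num out) := by unfold Spec_ambicioso; infer_instance

-- ===== CLAIM (what is proved, stated in full; the proofs are below) =====
def Claim_equal_ambicioso : Prop := ∀ (num : Int), Dom_ambicioso num → Spec_ambicioso num (ambicioso num)

-- ===== LEMMAS AND PROOFS =====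

-- A's trial loop as a Nat-indexed divisor sum
lemma dvd_toNat_iff (n i : Int) (hn : 0 ≤ n) (hi : 0 < i) :
    i ∣ n ↔ i.toNat ∣ n.toNat := by
  have h1 : ((i.toNat : Int)) = i := Int.toNat_of_nonneg hi.le
  have h2 : ((n.toNat : Int)) = n := Int.toNat_of_nonneg hn
  constructor
  · intro h
    exact Int.natCast_dvd_natCast.mp (by rw [h1, h2]; exact h)
  · intro h
    rw [← h1, ← h2]
    exact Int.natCast_dvd_natCast.mpr h

lemma mod_beq_zero (n i : Int) (hn : 0 ≤ n) (hi : 0 < i) :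
    (PySem.Int.mod n i == 0) = decide (i.toNat ∣ n.toNat) := by
  by_cases h : i.toNat ∣ n.toNat
  · simp [h, (PySem.Int.mod_eq_zero_iff_dvd n i).2 ((dvd_toNat_iff n i hn hi).2 h)]
  · have hne : PySem.Int.mod n i ≠ 0 := fun hc =>
      h ((dvd_toNat_iff n i hn hi).1 ((PySem.Int.mod_eq_zero_iff_dvd n i).1 hc))
    simp [h, hne]

lemma foldA_sum (n : Int) (hn : 2 ≤ n) :
    ∀ (fuel : Nat) (i s : Int), 2 ≤ i → (n - i).toNat ≤ fuel →
    (PySem.List.pyRange i n 1).foldl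
      (fun s j => if PySem.Int.mod n j == 0 then s + j else s) s
    = s + ∑ j ∈ Finset.Ico i.toNat n.toNat, (if j ∣ n.toNat then (j : Int) else 0) := by
  intro fuel
  induction fuel with
  | zero =>
    intro i s hi hf
    rw [PySem.List.pyRange_one_eq_nil (by omega : n ≤ i)]
    rw [Finset.Ico_eq_empty (by omega : ¬ i.toNat < n.toNat)]
    simp
  | succ fuel ih =>
    intro i s hi hf
    by_cases hlt : i < n
    · rw [PySem.List.pyRange_one_cons hlt]
      simp only [List.foldl_cons]
      rw [ih (i+1) _ (by omega) (by omega)]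
      rw [Finset.sum_eq_sum_Ico_succ_bot (by omega : i.toNat < n.toNat)]
      rw [(by omega : (i+1).toNat = i.toNat + 1)] at *
      rw [mod_beq_zero n i (by omega) (by omega)]
      have hcast : ((i.toNat : Int)) = i := Int.toNat_of_nonneg (by omega)
      by_cases hd : i.toNat ∣ n.toNat <;> simp [hd, hcast] <;> ring
    · rw [PySem.List.pyRange_one_eq_nil (by omega : n ≤ i)]
      rw [Finset.Ico_eq_empty (by omega : ¬ i.toNat < n.toNat)]
      simp

-- B's sqrt loop as a Nat-indexed paired-divisor sum
lemma foldB_sum (n : Int) (hn : 2 ≤ n) :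
    ∀ (fuel : Nat) (i s : Int), 2 ≤ i → (n + 1 - i).toNat ≤ fuel →
    propsumLoop fuel n i s
    = s + ∑ j ∈ Finset.Ico i.toNat (Nat.sqrt n.toNat + 1),
        (if j ∣ n.toNat then ((j : Int) + (if n.toNat / j ≠ j then ((n.toNat / j : Nat) : Int) else 0)) else 0) := by
  intro fuel
  induction fuel with
  | zero =>
    intro i s hi hf
    -- fuel 0 forces i > n, so the interval is empty
    have hni : n < i := by omega
    show s = _
    rw [Finset.Ico_eq_empty (by
      have := Nat.sqrt_le_self n.toNat
      omega : ¬ i.toNat < Nat.sqrt n.toNat + 1)]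
    simp
  | succ fuel ih =>
    intro i s hi hf
    by_cases hii : i * i ≤ n
    · show (if i * i ≤ n then _ else s) = _
      rw [if_pos hii]
      dsimp only
      rw [ih (i+1) _ (by omega) (by omega)]
      have hcast : ((i.toNat : Int)) = i := Int.toNat_of_nonneg (by omega)
      have hsq : i.toNat * i.toNat ≤ n.toNat := by
        have : ((i.toNat * i.toNat : Nat) : Int) ≤ ((n.toNat : Nat) : Int) := by
          push_cast
          rw [hcast, Int.toNat_of_nonneg (by omega : (0:Int) ≤ n)]
          exact hii
        exact_mod_cast this
      have hle : i.toNat < Nat.sqrt n.toNat + 1 := by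
        have := Nat.le_sqrt.mpr hsq
        omega
      rw [Finset.sum_eq_sum_Ico_succ_bot hle]
      rw [(by omega : (i+1).toNat = i.toNat + 1)] at *
      rw [mod_beq_zero n i (by omega) (by omega)]
      have hfd : PySem.Int.floordiv n i = ((n.toNat / i.toNat : Nat) : Int) := by
        rw [← hcast, ← Int.toNat_of_nonneg (by omega : (0:Int) ≤ n)]
        exact PySem.Int.floordiv_natCast n.toNat i.toNat
      rw [hfd]
      by_cases hd : i.toNat ∣ n.toNat
      · rw [if_pos (by simp [hd]), if_pos hd]
        by_cases hne : n.toNat / i.toNat = i.toNat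
        · rw [if_neg (by simp [hne, hcast]), if_neg (by simp [hne])]
          rw [hcast]
          ring
        · rw [if_pos (by
            rw [bne_iff_ne, ← hcast]
            exact_mod_cast hne), if_pos hne]
          rw [hcast]
          ring
      · rw [if_neg (by simp [hd]), if_neg hd]
        ring
    · show (if i * i ≤ n then _ else s) = _
      rw [if_neg hii]
      have hm : n.toNat < i.toNat * i.toNat := by
        have : ((n.toNat : Nat) : Int) < ((i.toNat * i.toNat : Nat) : Int) := by
          push_cast
          rw [Int.toNat_of_nonneg (by omega : (0:Int) ≤ n),
              Int.toNat_of_nonneg (by omega : (0:Int) ≤ i)]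
          omega
        exact_mod_cast this
      have hs : Nat.sqrt n.toNat < i.toNat := Nat.sqrt_lt'.mpr (by rw [pow_two]; exact hm)
      rw [Finset.Ico_eq_empty (by omega)]
      simp

-- the pairing identity: trial division up to m equals paired divisors up to sqrt m
lemma cofactor (m a k : Nat) (ha : 0 < a) (hk : m = a * k) : m / a = k := by
  rw [hk]; exact Nat.mul_div_cancel_left k ha

lemma pairing (m : Nat) :
    ∑ j ∈ Finset.Ico 2 m, (if j ∣ m then (j : Int) else 0)
    = ∑ j ∈ Finset.Ico 2 (Nat.sqrt m + 1),
        (if j ∣ m then ((j : Int) + (if m / j ≠ j then ((m / j : Nat) : Int) else 0)) else 0) := by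
  by_cases hm : m ≤ 1
  · rw [Finset.Ico_eq_empty (by omega), Finset.Ico_eq_empty (by
      interval_cases m <;> simp)]
    simp
  · push_neg at hm
    rw [← Finset.sum_filter, ← Finset.sum_filter]
    have hLT : (((Finset.Ico 2 m).filter (fun j => j ∣ m)).filter (fun j => j * j ≤ m))
        = ((Finset.Ico 2 (Nat.sqrt m + 1)).filter (fun j => j ∣ m)) := by
      ext j
      simp only [Finset.mem_filter, Finset.mem_Ico, Nat.lt_succ_iff, Nat.le_sqrt]
      constructor
      · rintro ⟨⟨⟨h2, hjm⟩, hdvd⟩, hsq⟩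
        exact ⟨⟨h2, hsq⟩, hdvd⟩
      · rintro ⟨⟨h2, hsq⟩, hdvd⟩
        have hjm : j < m := by
          rcases Nat.lt_or_ge j m with h | h
          · exact h
          · have := Nat.le_of_dvd (by omega) hdvd
            have hj : j = m := by omega
            nlinarith
        exact ⟨⟨⟨h2, hjm⟩, hdvd⟩, hsq⟩
    rw [← Finset.sum_filter_add_sum_filter_not
      ((Finset.Ico 2 m).filter (fun j => j ∣ m)) (fun j => j * j ≤ m), hLT,
      Finset.sum_add_distrib]
    congr 1
    rw [← Finset.sum_filter]
    apply Finset.sum_nbij' (fun j => m / j) (fun x => m / x)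
    · intro a ha
      simp only [Finset.mem_filter, Finset.mem_Ico, Nat.lt_succ_iff, Nat.le_sqrt] at ha ⊢
      obtain ⟨⟨⟨h2, ham⟩, ⟨k, hk⟩⟩, hsq⟩ := ha
      push_neg at hsq
      rw [hk] at hsq
      have hdiv : m / a = k := cofactor m a k (by omega) hk
      have hka : k < a := Nat.lt_of_mul_lt_mul_left hsq
      have hk2 : 2 ≤ k := by
        rcases Nat.lt_or_ge k 2 with h | h
        · interval_cases k <;> omega
        · exact h
      have hmk : m / k = a := cofactor m k a (by omega) (by rw [hk, mul_comm])
      refine ⟨⟨⟨?_, ?_⟩, ?_⟩, ?_⟩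
      · rw [hdiv]; omega
      · rw [hdiv]; nlinarith
      · rw [hdiv]; exact ⟨a, by rw [hk, mul_comm]⟩
      · rw [hdiv, hmk]; omega
    · intro a ha
      simp only [Finset.mem_filter, Finset.mem_Ico, Nat.lt_succ_iff, Nat.le_sqrt] at ha ⊢
      obtain ⟨⟨⟨h2, hsq⟩, ⟨k, hk⟩⟩, hne⟩ := ha
      rw [hk] at hsq
      have hdiv : m / a = k := cofactor m a k (by omega) hk
      rw [hdiv] at hne
      have hak : a < k := by
        rcases Nat.lt_or_ge a k with h | h
        · exact h
        · exfalso
          rcases Nat.lt_or_ge k a with h' | h'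
          · nlinarith
          · exact hne (by omega)
      refine ⟨⟨⟨?_, ?_⟩, ?_⟩, ?_⟩
      · rw [hdiv]; omega
      · rw [hdiv]; nlinarith
      · rw [hdiv]; exact ⟨a, by rw [hk, mul_comm]⟩
      · rw [hdiv]; intro hc; nlinarith
    · intro a ha
      simp only [Finset.mem_filter, Finset.mem_Ico] at ha
      obtain ⟨⟨⟨h2, ham⟩, ⟨k, hk⟩⟩, _⟩ := ha
      have hk0 : 0 < k := by
        rcases Nat.eq_zero_or_pos k with h | h
        · subst h; simp at hk; omega
        · exact h
      have hdiv : m / a = k := cofactor m a k (by omega) hk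
      rw [hdiv]
      exact cofactor m k a hk0 (by rw [hk, mul_comm])
    · intro a ha
      simp only [Finset.mem_filter, Finset.mem_Ico] at ha
      obtain ⟨⟨⟨h2, _⟩, ⟨k, hk⟩⟩, _⟩ := ha
      have hk0 : 0 < k := by
        rcases Nat.eq_zero_or_pos k with h | h
        · subst h; simp at hk; omega
        · exact h
      have hdiv : m / a = k := cofactor m a k (by omega) hk
      rw [hdiv]
      exact cofactor m k a hk0 (by rw [hk, mul_comm])
    · intro a ha
      simp only [Finset.mem_filter, Finset.mem_Ico] at ha
      obtain ⟨⟨⟨h2, ham⟩, ⟨k, hk⟩⟩, _⟩ := ha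
      have hk0 : 0 < k := by
        rcases Nat.eq_zero_or_pos k with h | h
        · subst h; simp at hk; omega
        · exact h
      have hdiv : m / a = k := cofactor m a k (by omega) hk
      have hmk : m / k = a := cofactor m k a hk0 (by rw [hk, mul_comm])
      rw [hdiv, hmk]

lemma propsum_eq (n : Int) :
    (PySem.List.pyRange 2 n 1).foldl
      (fun s j => if PySem.Int.mod n j == 0 then s + j else s) 1 = propsum n := by
  unfold propsum
  rcases Int.lt_or_le n 2 with h | h
  · rw [PySem.List.pyRange_one_eq_nil (by omega)]
    rcases hf : (n + 1 - 2).toNat with _ | f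
    · rfl
    · show _ = (if (2:Int) * 2 ≤ n then _ else 1)
      rw [if_neg (by omega)]
      rfl
  · rw [foldA_sum n h (n - 2).toNat 2 1 (by omega) (by omega),
        foldB_sum n h (n + 1 - 2).toNat 2 1 (by omega) (by omega)]
    rw [(by omega : ((2:Int)).toNat = 2), pairing n.toNat]

-- ===== VERDICT (by name: the statement is the Claim_ definition above) =====
theorem ambicioso_spec : Claim_equal_ambicioso := by
  intro num _
  unfold Spec_ambicioso ambicioso ambicioso_alt
  dsimp only
  rw [propsum_eq num, propsum_eq (propsum num)]
  rcases h : (propsum (propsum num) == propsum num) <;> simp [h]
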